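-- pv_equiv track=rewrite | github.com/darsovit/AdventOfCode | 2015/Day08/Day08.5.py | encode_for_program
-- ===== SOURCE A (Python) =====
-- def encode_for_program(line):
--     encoded_str = [ '\"' ]
--     for char in list(line):
--         if char == '\"':
--             encoded_str += list("\\\"")
--         elif char == '\\':
--             encoded_str += list("\\\\")
--         else:
--             encoded_str += [ char ]
--     encoded_str += [ '\"' ]
--     return ''.join(encoded_str)
-- ===== SOURCE B (Python) =====
-- def encode_for_program(line):
--     return '"' + line.replace('\\', '\\\\').replace('"', '\\"') + '"'
-- ===== Notes on version B (the rewrite author's own statement) =====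
-- stated objective: idiomatic
-- what changed: Replaced the per-character branch loop with two global str.replace passes (backslashes first, then quotes) plus plain concatenation of the surrounding quotes.
import Mathlib
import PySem

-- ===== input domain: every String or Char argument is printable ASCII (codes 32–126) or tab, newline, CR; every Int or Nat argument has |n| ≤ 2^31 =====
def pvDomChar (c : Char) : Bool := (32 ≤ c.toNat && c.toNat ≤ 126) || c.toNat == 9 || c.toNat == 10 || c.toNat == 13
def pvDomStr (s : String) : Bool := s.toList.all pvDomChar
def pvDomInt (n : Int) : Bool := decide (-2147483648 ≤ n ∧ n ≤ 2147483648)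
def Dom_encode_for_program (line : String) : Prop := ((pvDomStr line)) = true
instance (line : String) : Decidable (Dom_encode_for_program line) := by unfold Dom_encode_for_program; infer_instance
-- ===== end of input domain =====

-- B replaces A's per-character branch loop by two global replace passes (backslashes first, then quotes), for idiomatic clarity.

-- ===== PORT A =====
-- loop over list(line), extending a character accumulator, then ''.join
def encode_for_program (line : String) : String :=
  let encoded_str : List Char :=
    line.toList.foldl (fun acc c =>
      if c = '"' then acc ++ ['\\', '"']
      else if c = '\\' then acc ++ ['\\', '\\']
      else acc ++ [c]) ['"']
  String.ofList (encoded_str ++ ['"'])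

-- ===== PORT B =====
-- '"' + line.replace('\\','\\\\').replace('"','\\"') + '"'
def encode_for_program_alt (line : String) : String :=
  "\"" ++ PySem.Str.replace (PySem.Str.replace line "\\" "\\\\") "\"" "\\\"" ++ "\""

-- ===== PRECONDITION & SPEC =====
def Spec_encode_for_program (line : String) (out : String) : Prop := out = encode_for_program_alt line
instance (line : String) (out : String) : Decidable (Spec_encode_for_program line out) := by unfold Spec_encode_for_program; infer_instance

-- ===== CLAIM (what is proved, stated in full; the proofs are below) =====
def Claim_equal_encode_for_program : Prop := ∀ (line : String), Dom_encode_for_program line → Spec_encode_for_program line (encode_for_program line)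

-- ===== LEMMAS AND PROOFS =====

-- replace with a single-character pattern is a flatMap substitution
theorem replace_go_single (o : Char) (new : List Char) :
    ∀ (fuel : Nat) (l acc : List Char), l.length ≤ fuel →
      PySem.Chars.replace.go [o] new fuel l acc
        = acc.reverse ++ l.flatMap (fun c => if c = o then new else [c]) := by
  intro fuel
  induction fuel with
  | zero =>
    intro l acc h
    have : l = [] := List.eq_nil_of_length_eq_zero (Nat.le_zero.mp h)
    subst this
    simp [PySem.Chars.replace.go]
  | succ n ih =>
    intro l acc h
    have h' := h
    cases l with
    | nil => simp [PySem.Chars.replace.go]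
    | cons c t =>
      have ht : t.length ≤ n := by simp at h'; omega
      rw [PySem.Chars.replace.go]
      by_cases hc : c = o
      · subst hc
        have hp : List.isPrefixOf [c] (c :: t) = true := by simp [List.isPrefixOf]
        simp only [hp, if_true, List.length_cons, List.length_nil, Nat.zero_add,
          List.drop_succ_cons, List.drop_zero]
        rw [ih t (new.reverse ++ acc) ht]
        simp [List.flatMap_cons]
      · have hp : List.isPrefixOf [o] (c :: t) = false := by
          simp [List.isPrefixOf]
          exact fun h'' => hc h''.symm
        simp only [hp, Bool.false_eq_true, if_false]
        rw [ih t (c :: acc) ht]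
        simp [List.flatMap_cons, if_neg hc]

theorem replace_single (s : List Char) (o : Char) (new : List Char) :
    PySem.Chars.replace s [o] new = s.flatMap (fun c => if c = o then new else [c]) := by
  rw [PySem.Chars.replace]
  simp only [List.isEmpty_cons, Bool.false_eq_true, if_false]
  simpa using replace_go_single o new s.length s [] le_rfl

-- ===== VERDICT (by name: the statement is the Claim_ definition above) =====
theorem encode_for_program_spec : Claim_equal_encode_for_program := by
  intro line _
  unfold Spec_encode_for_program encode_for_program encode_for_program_alt
  apply String.toList_injective
  simp only [PySem.Str.replace, String.toList_append, String.toList_ofList]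
  have e1 : ("\\" : String).toList = ['\\'] := rfl
  have e2 : ("\"" : String).toList = ['"'] := rfl
  have e3 : ("\\\\" : String).toList = ['\\', '\\'] := rfl
  have e4 : ("\\\"" : String).toList = ['\\', '"'] := rfl
  have hf : (fun (acc : List Char) c =>
        if c = '"' then acc ++ ['\\', '"'] else if c = '\\' then acc ++ ['\\', '\\'] else acc ++ [c])
      = (fun (acc : List Char) c =>
        acc ++ (if c = '"' then ['\\', '"'] else if c = '\\' then ['\\', '\\'] else [c])) := by
    funext acc c
    split_ifs <;> rfl
  rw [e1, e2, e3, e4, replace_single, replace_single, hf,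
    PySem.List.foldl_append_eq_flatMap, List.flatMap_assoc]
  have hfun : (fun c => List.flatMap (fun d => if d = '"' then ['\\', '"'] else [d])
        (if c = '\\' then ['\\', '\\'] else [c]))
      = (fun c => if c = '"' then ['\\', '"'] else if c = '\\' then ['\\', '\\'] else [c]) := by
    funext c
    by_cases h1 : c = '\\' <;> by_cases h2 : c = '"' <;> simp_all
  rw [hfun]
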